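-- pv_equiv track=rewrite | github.com/volcengine/veScale | test/dtensor/cpu_only/test_break_ragged_box.py | produce_test_tensor_shape
-- ===== SOURCE A (Python) =====
-- import math
-- import itertools
--
-- def product_limited(lst, repeat, max_count):
--     def backtrack(current):
--         if len(current) == repeat:
--             yield tuple(current)
--             return
--         for x in lst:
--             if current.count(x) < max_count:
--                 yield from backtrack(current + [x])
--
--     yield from backtrack([])
--
-- def produce_test_tensor_shape(nd=(1, 2, 3, 4, 5), threshold=128 * 128):
--     assert isinstance(nd, tuple)
--     shape_1d = (3, 16, 32, 53)
--     shape_2d = itertools.product(shape_1d, repeat=2)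
--     shape_3d = itertools.product(shape_1d, repeat=3)
--     shape_4d = product_limited(shape_1d, repeat=4, max_count=3)
--     shape_5d = product_limited(shape_1d, repeat=5, max_count=3)
--
--     all_shape = []
--     for i, s in enumerate((((x,) for x in shape_1d), shape_2d, shape_3d, shape_4d, shape_5d)):
--         if i + 1 in nd:
--             all_shape.append(s)
--     iter_chain = itertools.chain(*all_shape)
--     return filter(lambda x: math.prod(x) < threshold, iter_chain)
-- ===== SOURCE B (Python) =====
-- import math
-- import itertools
--
-- def produce_test_tensor_shape(nd=(1, 2, 3, 4, 5), threshold=128 * 128):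
--     assert isinstance(nd, tuple)
--     shape_1d = (3, 16, 32, 53)
--
--     def gen():
--         for d in range(1, 6):
--             if d in nd:
--                 for t in itertools.product(shape_1d, repeat=d):
--                     if d >= 4 and any(t.count(x) > 3 for x in t):
--                         continue
--                     if math.prod(t) < threshold:
--                         yield t
--
--     return gen()
-- ===== Notes on version B (the rewrite author's own statement) =====
-- stated objective: simpler
-- what changed: Replaced the recursive prune-as-you-build product_limited helper and the enumerate/chain pipeline by a single flat loop over dimensions 1..5 that enumerates itertools.product and filters out over-capped (only for 4-D/5-D) and over-threshold tuples.
import Mathlib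
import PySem

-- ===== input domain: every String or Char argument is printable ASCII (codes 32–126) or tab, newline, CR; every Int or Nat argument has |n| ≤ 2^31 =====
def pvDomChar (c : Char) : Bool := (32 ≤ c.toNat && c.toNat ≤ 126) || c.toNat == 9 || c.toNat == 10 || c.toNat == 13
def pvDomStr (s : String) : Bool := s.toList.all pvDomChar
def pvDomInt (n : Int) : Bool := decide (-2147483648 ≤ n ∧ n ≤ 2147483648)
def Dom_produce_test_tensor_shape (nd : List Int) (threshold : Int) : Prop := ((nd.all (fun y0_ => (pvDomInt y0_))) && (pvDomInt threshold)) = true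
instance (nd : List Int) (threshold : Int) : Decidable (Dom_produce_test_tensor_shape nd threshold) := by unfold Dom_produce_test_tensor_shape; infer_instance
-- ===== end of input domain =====

-- B replaces the prune-as-you-build recursion (product_limited) by a flat per-dimension
-- generate-and-filter loop over range(1,6); same yielded tuples in the same order (objective: simpler).
-- Return-value equivalence only: A returns a filter object, B a generator (same yielded sequence).


-- shared port of library calls both Pythons make:
-- itertools.product(lst, repeat=n) (lexicographic, first coordinate slowest)
def pvProduct (lst : List Int) : Nat → List (List Int)
  | 0 => [[]]
  | n + 1 => lst.flatMap (fun x => (pvProduct lst n).map (fun t => x :: t))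

-- math.prod
def pvMathProd (xs : List Int) : Int := xs.foldl (· * ·) 1

-- ===== PORT A =====
-- product_limited's inner backtrack; fuel = repeat - len(current)
def pvBacktrack (lst : List Int) (maxc : Nat) : Nat → List Int → List (List Int)
  | 0, current => [current]
  | n + 1, current =>
      lst.flatMap (fun x =>
        if current.count x < maxc then pvBacktrack lst maxc n (current ++ [x]) else [])

def product_limited (lst : List Int) (rep : Nat) (maxc : Nat) : List (List Int) :=
  pvBacktrack lst maxc rep []

def produce_test_tensor_shape (nd : List Int) (threshold : Int) : List (List Int) :=
  let shape_1d : List Int := [3, 16, 32, 53]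
  let shape_2d := pvProduct shape_1d 2
  let shape_3d := pvProduct shape_1d 3
  let shape_4d := product_limited shape_1d 4 3
  let shape_5d := product_limited shape_1d 5 3
  -- the enumerate loop over the 5 generators, keeping those with i+1 in nd
  let all_shape :=
    (if nd.contains 1 then [shape_1d.map (fun x => [x])] else []) ++
    (if nd.contains 2 then [shape_2d] else []) ++
    (if nd.contains 3 then [shape_3d] else []) ++
    (if nd.contains 4 then [shape_4d] else []) ++
    (if nd.contains 5 then [shape_5d] else [])
  all_shape.flatten.filter (fun x => pvMathProd x < threshold)

-- ===== PORT B =====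
def produce_test_tensor_shape_alt (nd : List Int) (threshold : Int) : List (List Int) :=
  let shape_1d : List Int := [3, 16, 32, 53]
  (PySem.List.pyRange 1 6 1).flatMap (fun d =>
    if nd.contains d then
      (pvProduct shape_1d d.toNat).filter (fun t =>
        !(decide (4 ≤ d) && t.any (fun x => decide (3 < t.count x))) &&
        decide (pvMathProd t < threshold))
    else [])

-- ===== PRECONDITION & SPEC =====
def Spec_produce_test_tensor_shape (nd : List Int) (threshold : Int) (out : List (List Int)) : Prop := out = produce_test_tensor_shape_alt nd threshold
instance (nd : List Int) (threshold : Int) (out : List (List Int)) : Decidable (Spec_produce_test_tensor_shape nd threshold out) := by unfold Spec_produce_test_tensor_shape; infer_instance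

-- ===== CLAIM (what is proved, stated in full; the proofs are below) =====
def Claim_equal_produce_test_tensor_shape : Prop := ∀ (nd : List Int) (threshold : Int), Dom_produce_test_tensor_shape nd threshold → Spec_produce_test_tensor_shape nd threshold (produce_test_tensor_shape nd threshold)

-- ===== LEMMAS AND PROOFS =====
theorem pv_filter_if (p : List Int → Bool) (c : Bool) (l : List (List Int)) :
    List.filter p (if c then l else []) = if c then List.filter p l else [] := by
  cases c <;> simp

theorem pv_flatten_if (c : Bool) (s : List (List Int)) :
    (if c then [s] else []).flatten = if c then s else [] := by
  cases c <;> simp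

theorem pv_if_eq (c : Bool) {X Y : List (List Int)} (h : X = Y) :
    (if c then X else []) = (if c then Y else []) := by rw [h]

-- for d ∈ {1,2,3} the count cap in B is inert
theorem pv_pred_small (th : Int) (d : Int) (hd : ¬ (4 ≤ d)) (t : List Int) :
    (!(decide (4 ≤ d) && t.any (fun x => decide (3 < t.count x))) &&
       decide (pvMathProd t < th)) = decide (pvMathProd t < th) := by
  simp [hd]

-- the count-capped filter of the full product equals the backtracking enumeration
set_option maxRecDepth 100000 in
theorem pv_cap4 :
    List.filter (fun t => !(t.any (fun x => decide (3 < t.count x))))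
      (pvProduct [3, 16, 32, 53] 4) = product_limited [3, 16, 32, 53] 4 3 := by decide

set_option maxRecDepth 100000 in
theorem pv_cap5 :
    List.filter (fun t => !(t.any (fun x => decide (3 < t.count x))))
      (pvProduct [3, 16, 32, 53] 5) = product_limited [3, 16, 32, 53] 5 3 := by decide

theorem pv_seg_big (th : Int) (rep : Nat) (hd : List.filter (fun t => !(t.any (fun x => decide (3 < t.count x)))) (pvProduct [3, 16, 32, 53] rep) = product_limited [3, 16, 32, 53] rep 3) :
    List.filter (fun t =>
        !(true && t.any (fun x => decide (3 < t.count x))) && decide (pvMathProd t < th))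
      (pvProduct [3, 16, 32, 53] rep)
    = List.filter (fun x => decide (pvMathProd x < th)) (product_limited [3, 16, 32, 53] rep 3) := by
  rw [← hd, List.filter_filter]
  exact List.filter_congr (fun t _ => by rw [Bool.true_and, Bool.and_comm])

-- ===== VERDICT (by name: the statement is the Claim_ definition above) =====
set_option maxRecDepth 100000 in
theorem produce_test_tensor_shape_spec : Claim_equal_produce_test_tensor_shape := by
  intro nd th _
  unfold Spec_produce_test_tensor_shape produce_test_tensor_shape produce_test_tensor_shape_alt
  have hr : PySem.List.pyRange 1 6 1 = [1, 2, 3, 4, 5] := by decide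
  rw [hr]
  simp only [List.flatMap_cons, List.flatMap_nil, List.append_nil, List.append_assoc,
    List.flatten_append, pv_flatten_if, List.filter_append, pv_filter_if,
    show Int.toNat 1 = 1 from rfl, show Int.toNat 2 = 2 from rfl, show Int.toNat 3 = 3 from rfl,
    show Int.toNat 4 = 4 from rfl, show Int.toNat 5 = 5 from rfl]
  refine congrArg₂ (· ++ ·) ?_ ?_
  · exact pv_if_eq _ (by
      have hp : pvProduct [3, 16, 32, 53] 1 = ([3, 16, 32, 53] : List Int).map (fun x => [x]) := by decide
      rw [hp]
      exact (List.filter_congr (fun t _ => pv_pred_small th 1 (by norm_num) t)).symm)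
  refine congrArg₂ (· ++ ·) ?_ ?_
  · exact pv_if_eq _ ((List.filter_congr (fun t _ => pv_pred_small th 2 (by norm_num) t)).symm)
  refine congrArg₂ (· ++ ·) ?_ ?_
  · exact pv_if_eq _ ((List.filter_congr (fun t _ => pv_pred_small th 3 (by norm_num) t)).symm)
  refine congrArg₂ (· ++ ·) ?_ ?_
  · exact pv_if_eq _ (by
      have h := pv_seg_big th 4 pv_cap4
      simpa using h.symm)
  · exact pv_if_eq _ (by
      have h := pv_seg_big th 5 pv_cap5
      simpa using h.symm)
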